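-- pv_equiv track=rewrite | github.com/Slava12233/TradeReady_BackEnd- | src/utils/helpers.py | symbol_to_base_quote
-- ===== SOURCE A (Python) =====
-- _KNOWN_QUOTES: tuple[str, ...] = ("USDT", "BUSD", "USDC", "TUSD", "BTC", "ETH", "BNB", "DAI", "PAX")
--
-- def symbol_to_base_quote(symbol: str) -> tuple[str, str]:
--     """Split a Binance-style trading pair symbol into base and quote assets.
--
--     Attempts to identify common quote currencies (USDT, BTC, ETH, BNB, BUSD,
--     USDC, TUSD, PAX, DAI) as suffixes.  Falls back to a 50/50 split when no
--     recognised quote suffix is found.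
--
--     Args:
--         symbol: Upper-case pair symbol, e.g. ``"BTCUSDT"``, ``"ETHBTC"``.
--
--     Returns:
--         A two-tuple ``(base, quote)``, e.g. ``("BTC", "USDT")``.
--
--     Example::
--
--         assert symbol_to_base_quote("BTCUSDT") == ("BTC", "USDT")
--         assert symbol_to_base_quote("ETHBTC")  == ("ETH", "BTC")
--     """
--     symbol = symbol.upper()
--     for quote in _KNOWN_QUOTES:
--         if symbol.endswith(quote) and len(symbol) > len(quote):
--             base = symbol[: -len(quote)]
--             return base, quote
--     # Fallback: split at midpoint.
--     mid = len(symbol) // 2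
--     return symbol[:mid], symbol[mid:]
-- ===== SOURCE B (Python) =====
-- _QUOTE_SET = frozenset(("USDT", "BUSD", "USDC", "TUSD", "BTC", "ETH", "BNB", "DAI", "PAX"))
--
-- def symbol_to_base_quote(symbol):
--     """Split a trading pair symbol into (base, quote).
--
--     Instead of scanning the list of known quotes with endswith, loop over the
--     two suffix lengths (4 then 3), slice the candidate suffix once and test it
--     against a frozenset; fall back to the midpoint split.
--     """
--     symbol = symbol.upper()
--     for n in (4, 3):
--         if len(symbol) > n:
--             candidate = symbol[-n:]
--             if candidate in _QUOTE_SET: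
--                 return symbol[:-n], candidate
--     mid = len(symbol) // 2
--     return symbol[:mid], symbol[mid:]
-- ===== Notes on version B (the rewrite author's own statement) =====
-- stated objective: alternative
-- what changed: B loops over the two suffix lengths (4 then 3), slicing one candidate suffix per length and testing it for membership in a frozenset of known quotes, instead of A's scan over the quote list with endswith per quote.
import Mathlib
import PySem

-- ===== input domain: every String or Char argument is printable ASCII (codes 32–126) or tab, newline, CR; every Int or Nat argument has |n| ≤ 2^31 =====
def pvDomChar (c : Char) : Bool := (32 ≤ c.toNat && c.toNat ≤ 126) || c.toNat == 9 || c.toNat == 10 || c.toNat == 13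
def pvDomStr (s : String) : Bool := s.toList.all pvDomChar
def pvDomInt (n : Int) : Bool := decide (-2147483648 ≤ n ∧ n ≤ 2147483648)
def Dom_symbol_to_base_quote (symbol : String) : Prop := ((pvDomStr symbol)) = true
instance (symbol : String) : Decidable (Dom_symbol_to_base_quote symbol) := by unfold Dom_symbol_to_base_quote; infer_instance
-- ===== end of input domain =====

-- B replaces A's scan of the known-quote list with a loop over the two suffix lengths (4, 3),
-- slicing one candidate per length and testing it against a set of known quotes (objective: alternative).


-- ===== PORT A =====
-- _KNOWN_QUOTES
def pvKnownQuotes : List String := ["USDT", "BUSD", "USDC", "TUSD", "BTC", "ETH", "BNB", "DAI", "PAX"]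

-- the 'for quote in _KNOWN_QUOTES' loop: returns some (base, quote) on the in-loop return, none if it runs off
def pvALoop (s : String) : List String → Option (String × String)
  | [] => none
  | q :: rest =>
    if PySem.Str.endswith s q = true ∧ PySem.Str.len q < PySem.Str.len s then
      some (PySem.Str.slice s none (some (-(PySem.Str.len q))), q)
    else pvALoop s rest

def symbol_to_base_quote (symbol : String) : String × String :=
  let s := PySem.Str.upper symbol
  match pvALoop s pvKnownQuotes with
  | some r => r
  | none =>
    let mid := PySem.Int.floordiv (PySem.Str.len s) 2
    (PySem.Str.slice s none (some mid), PySem.Str.slice s (some mid) none)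

-- ===== PORT B =====
-- _QUOTE_SET
def pvQuoteSet : PySem.Set String :=
  PySem.Set.ofList ["USDT", "BUSD", "USDC", "TUSD", "BTC", "ETH", "BNB", "DAI", "PAX"]

-- the 'for n in (4, 3)' loop with the midpoint fallback after it
def pvBLoop (s : String) : List Int → String × String
  | [] =>
    let mid := PySem.Int.floordiv (PySem.Str.len s) 2
    (PySem.Str.slice s none (some mid), PySem.Str.slice s (some mid) none)
  | n :: rest =>
    if n < PySem.Str.len s then
      let candidate := PySem.Str.slice s (some (-n)) none
      if PySem.Set.contains pvQuoteSet candidate = true then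
        (PySem.Str.slice s none (some (-n)), candidate)
      else pvBLoop s rest
    else pvBLoop s rest

def symbol_to_base_quote_alt (symbol : String) : String × String :=
  pvBLoop (PySem.Str.upper symbol) [4, 3]

-- ===== PRECONDITION & SPEC =====
def Spec_symbol_to_base_quote (symbol : String) (out : String × String) : Prop := out = symbol_to_base_quote_alt symbol
instance (symbol : String) (out : String × String) : Decidable (Spec_symbol_to_base_quote symbol out) := by unfold Spec_symbol_to_base_quote; infer_instance

-- ===== CLAIM (what is proved, stated in full; the proofs are below) =====
def Claim_equal_symbol_to_base_quote : Prop := ∀ (symbol : String), Dom_symbol_to_base_quote symbol → Spec_symbol_to_base_quote symbol (symbol_to_base_quote symbol)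


-- ===== LEMMAS AND PROOFS =====

-- endswith by a string of length n, under n <= len s, says exactly that the length-n suffix slice is that string
theorem pv_ends_iff (s q : String) (n : Nat) (hn : 1 < n) (hq : q.toList.length = n)
    (_hlen : n ≤ s.toList.length) :
    (PySem.Str.endswith s q = true) ↔ PySem.Str.slice s (some (-(n : Int))) none = q := by
  rw [PySem.Str.endswith_eq, PySem.Chars.endswith_iff, List.suffix_iff_eq_drop, hq,
    ← String.toList_inj, PySem.Str.toList_slice]
  rw [show PySem.Chars.slice s.toList (some (-(n : Int))) none
        = PySem.List.slice s.toList (some (-(OfNat.ofNat n : Int))) none from rfl]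
  rw [PySem.List.slice_from_neg_ofNat _ n hn]
  exact ⟨fun h => h.symm, fun h => h.symm⟩

theorem pv_len_slice_from (s : String) (n : Nat) (hn : 1 < n) (hlen : n ≤ s.toList.length) :
    (PySem.Str.slice s (some (-(n : Int))) none).toList.length = n := by
  rw [PySem.Str.toList_slice,
    show PySem.Chars.slice s.toList (some (-(n : Int))) none
        = PySem.List.slice s.toList (some (-(OfNat.ofNat n : Int))) none from rfl,
    PySem.List.slice_from_neg_ofNat _ n hn, List.length_drop]
  omega


-- the loop condition for a quote of length n: the length-n suffix slice is that quote
theorem pv_cond_iff (s q : String) (n : Nat) (hn : 1 < n) (hq : q.toList.length = n) :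
    (PySem.Str.endswith s q = true ∧ ((n : Nat) : Int) < PySem.Str.len s) ↔
      (((n : Nat) : Int) < PySem.Str.len s ∧ PySem.Str.slice s (some (-((n : Nat) : Int))) none = q) := by
  have hlen : ∀ (_ : ((n : Nat) : Int) < PySem.Str.len s), n ≤ s.toList.length := by
    intro h; rw [PySem.Str.len_eq] at h; omega
  constructor
  · rintro ⟨he, hl⟩
    exact ⟨hl, (pv_ends_iff s q n hn hq (hlen hl)).1 he⟩
  · rintro ⟨hl, hs⟩
    exact ⟨(pv_ends_iff s q n hn hq (hlen hl)).2 hs, hl⟩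

theorem pv_cond4 (s q : String) (hq : q.toList.length = 4) :
    (PySem.Str.endswith s q = true ∧ (4 : Int) < PySem.Str.len s) ↔
      ((4 : Int) < PySem.Str.len s ∧ PySem.Str.slice s (some (-(4 : Int))) none = q) := by
  exact pv_cond_iff s q 4 (by omega) hq

theorem pv_cond3 (s q : String) (hq : q.toList.length = 3) :
    (PySem.Str.endswith s q = true ∧ (3 : Int) < PySem.Str.len s) ↔
      ((3 : Int) < PySem.Str.len s ∧ PySem.Str.slice s (some (-(3 : Int))) none = q) := by
  exact pv_cond_iff s q 3 (by omega) hq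

theorem pv_len_cand4 (s : String) (h : 4 < s.length) :
    (PySem.Str.slice s (some (-(4 : Int))) none).toList.length = 4 := by
  refine pv_len_slice_from s 4 (by omega) ?_
  rw [String.length_toList]; omega

theorem pv_len_cand3 (s : String) (h : 3 < s.length) :
    (PySem.Str.slice s (some (-(3 : Int))) none).toList.length = 3 := by
  refine pv_len_slice_from s 3 (by omega) ?_
  rw [String.length_toList]; omega

theorem pv_main (s : String) :
    pvBLoop s [4, 3] =
      (match pvALoop s pvKnownQuotes with
        | some r => r
        | none =>
          (PySem.Str.slice s none (some (PySem.Int.floordiv (PySem.Str.len s) 2)),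
           PySem.Str.slice s (some (PySem.Int.floordiv (PySem.Str.len s) 2)) none)) := by
  have c1 := pv_cond4 s "USDT" (by decide)
  have c2 := pv_cond4 s "BUSD" (by decide)
  have c3 := pv_cond4 s "USDC" (by decide)
  have c4 := pv_cond4 s "TUSD" (by decide)
  have c5 := pv_cond3 s "BTC" (by decide)
  have c6 := pv_cond3 s "ETH" (by decide)
  have c7 := pv_cond3 s "BNB" (by decide)
  have c8 := pv_cond3 s "DAI" (by decide)
  have c9 := pv_cond3 s "PAX" (by decide)
  simp at c1 c2 c3 c4 c5 c6 c7 c8 c9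
  by_cases hM : 4 < s.length
  · have hL : 3 < s.length := by omega
    have d1 : PySem.Chars.endswith s.toList ['U', 'S', 'D', 'T'] = true ↔
        PySem.Str.slice s (some (-(4 : Int))) none = "USDT" :=
      ⟨fun h => (c1.mp ⟨h, hM⟩).2, fun h => (c1.mpr ⟨hM, h⟩).1⟩
    have d2 : PySem.Chars.endswith s.toList ['B', 'U', 'S', 'D'] = true ↔
        PySem.Str.slice s (some (-(4 : Int))) none = "BUSD" :=
      ⟨fun h => (c2.mp ⟨h, hM⟩).2, fun h => (c2.mpr ⟨hM, h⟩).1⟩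
    have d3 : PySem.Chars.endswith s.toList ['U', 'S', 'D', 'C'] = true ↔
        PySem.Str.slice s (some (-(4 : Int))) none = "USDC" :=
      ⟨fun h => (c3.mp ⟨h, hM⟩).2, fun h => (c3.mpr ⟨hM, h⟩).1⟩
    have d4 : PySem.Chars.endswith s.toList ['T', 'U', 'S', 'D'] = true ↔
        PySem.Str.slice s (some (-(4 : Int))) none = "TUSD" :=
      ⟨fun h => (c4.mp ⟨h, hM⟩).2, fun h => (c4.mpr ⟨hM, h⟩).1⟩
    have d5 : PySem.Chars.endswith s.toList ['B', 'T', 'C'] = true ↔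
        PySem.Str.slice s (some (-(3 : Int))) none = "BTC" :=
      ⟨fun h => (c5.mp ⟨h, hL⟩).2, fun h => (c5.mpr ⟨hL, h⟩).1⟩
    have d6 : PySem.Chars.endswith s.toList ['E', 'T', 'H'] = true ↔
        PySem.Str.slice s (some (-(3 : Int))) none = "ETH" :=
      ⟨fun h => (c6.mp ⟨h, hL⟩).2, fun h => (c6.mpr ⟨hL, h⟩).1⟩
    have d7 : PySem.Chars.endswith s.toList ['B', 'N', 'B'] = true ↔
        PySem.Str.slice s (some (-(3 : Int))) none = "BNB" :=
      ⟨fun h => (c7.mp ⟨h, hL⟩).2, fun h => (c7.mpr ⟨hL, h⟩).1⟩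
    have d8 : PySem.Chars.endswith s.toList ['D', 'A', 'I'] = true ↔
        PySem.Str.slice s (some (-(3 : Int))) none = "DAI" :=
      ⟨fun h => (c8.mp ⟨h, hL⟩).2, fun h => (c8.mpr ⟨hL, h⟩).1⟩
    have d9 : PySem.Chars.endswith s.toList ['P', 'A', 'X'] = true ↔
        PySem.Str.slice s (some (-(3 : Int))) none = "PAX" :=
      ⟨fun h => (c9.mp ⟨h, hL⟩).2, fun h => (c9.mpr ⟨hL, h⟩).1⟩
    have h4len := pv_len_cand4 s hM
    have n5 : PySem.Str.slice s (some (-(4 : Int))) none ≠ "BTC" := by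
      intro h; rw [h] at h4len; simp at h4len
    have n6 : PySem.Str.slice s (some (-(4 : Int))) none ≠ "ETH" := by
      intro h; rw [h] at h4len; simp at h4len
    have n7 : PySem.Str.slice s (some (-(4 : Int))) none ≠ "BNB" := by
      intro h; rw [h] at h4len; simp at h4len
    have n8 : PySem.Str.slice s (some (-(4 : Int))) none ≠ "DAI" := by
      intro h; rw [h] at h4len; simp at h4len
    have n9 : PySem.Str.slice s (some (-(4 : Int))) none ≠ "PAX" := by
      intro h; rw [h] at h4len; simp at h4len
    have h3len := pv_len_cand3 s hL
    have g5 : PySem.Str.slice s (some (-(3 : Int))) none ≠ "USDT" := by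
      intro h; rw [h] at h3len; simp at h3len
    have g6 : PySem.Str.slice s (some (-(3 : Int))) none ≠ "BUSD" := by
      intro h; rw [h] at h3len; simp at h3len
    have g7 : PySem.Str.slice s (some (-(3 : Int))) none ≠ "USDC" := by
      intro h; rw [h] at h3len; simp at h3len
    have g8 : PySem.Str.slice s (some (-(3 : Int))) none ≠ "TUSD" := by
      intro h; rw [h] at h3len; simp at h3len
    by_cases e1 : PySem.Str.slice s (some (-(4 : Int))) none = "USDT"
    · simp [pvALoop, pvKnownQuotes, pvBLoop, d1, pvQuoteSet, PySem.Set.ofList, PySem.Set.add, hM, e1]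
    · by_cases e2 : PySem.Str.slice s (some (-(4 : Int))) none = "BUSD"
      · simp [pvALoop, pvKnownQuotes, pvBLoop, d1, d2, pvQuoteSet, PySem.Set.ofList, PySem.Set.add, hM, e2]
      · by_cases e3 : PySem.Str.slice s (some (-(4 : Int))) none = "USDC"
        · simp [pvALoop, pvKnownQuotes, pvBLoop, d1, d2, d3, pvQuoteSet, PySem.Set.ofList, PySem.Set.add, hM, e1, e2, e3]
        · by_cases e4 : PySem.Str.slice s (some (-(4 : Int))) none = "TUSD"
          · simp [pvALoop, pvKnownQuotes, pvBLoop, d1, d2, d3, d4, pvQuoteSet, PySem.Set.ofList, PySem.Set.add, hM, e1, e2, e3, e4]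
          · by_cases f5 : PySem.Str.slice s (some (-(3 : Int))) none = "BTC"
            · simp [pvALoop, pvKnownQuotes, pvBLoop, d1, d2, d3, d4, d5, pvQuoteSet, PySem.Set.ofList, PySem.Set.add, hM, hL,
                e1, e2, e3, e4, n5, n6, n7, n8, n9, f5]
            · by_cases f6 : PySem.Str.slice s (some (-(3 : Int))) none = "ETH"
              · simp [pvALoop, pvKnownQuotes, pvBLoop, d1, d2, d3, d4, d5, d6, pvQuoteSet, PySem.Set.ofList, PySem.Set.add, hM, hL,
                  e1, e2, e3, e4, n5, n6, n7, n8, n9, f5, f6]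
              · by_cases f7 : PySem.Str.slice s (some (-(3 : Int))) none = "BNB"
                · simp [pvALoop, pvKnownQuotes, pvBLoop, d1, d2, d3, d4, d5, d6, d7, pvQuoteSet, PySem.Set.ofList, PySem.Set.add, hM, hL,
                    e1, e2, e3, e4, n5, n6, n7, n8, n9, f5, f6, f7]
                · by_cases f8 : PySem.Str.slice s (some (-(3 : Int))) none = "DAI"
                  · simp [pvALoop, pvKnownQuotes, pvBLoop, d1, d2, d3, d4, d5, d6, d7, d8, pvQuoteSet, PySem.Set.ofList, PySem.Set.add, hM, hL,
                      e1, e2, e3, e4, n5, n6, n7, n8, n9, f5, f6, f7, f8]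
                  · by_cases f9 : PySem.Str.slice s (some (-(3 : Int))) none = "PAX"
                    · simp [pvALoop, pvKnownQuotes, pvBLoop, d1, d2, d3, d4, d5, d6, d7, d8, d9,
                        pvQuoteSet, PySem.Set.ofList, PySem.Set.add, hM, hL, e1, e2, e3, e4, n5, n6, n7, n8, n9, f5, f6, f7, f8, f9]
                    · simp [pvALoop, pvKnownQuotes, pvBLoop, d1, d2, d3, d4, d5, d6, d7, d8, d9,
                        pvQuoteSet, PySem.Set.ofList, PySem.Set.add, hM, hL, e1, e2, e3, e4, n5, n6, n7, n8, n9,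
                        f5, f6, f7, f8, f9, g5, g6, g7, g8]
  · by_cases hL : 3 < s.length
    · have d5 : PySem.Chars.endswith s.toList ['B', 'T', 'C'] = true ↔
          PySem.Str.slice s (some (-(3 : Int))) none = "BTC" :=
        ⟨fun h => (c5.mp ⟨h, hL⟩).2, fun h => (c5.mpr ⟨hL, h⟩).1⟩
      have d6 : PySem.Chars.endswith s.toList ['E', 'T', 'H'] = true ↔
          PySem.Str.slice s (some (-(3 : Int))) none = "ETH" :=
        ⟨fun h => (c6.mp ⟨h, hL⟩).2, fun h => (c6.mpr ⟨hL, h⟩).1⟩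
      have d7 : PySem.Chars.endswith s.toList ['B', 'N', 'B'] = true ↔
          PySem.Str.slice s (some (-(3 : Int))) none = "BNB" :=
        ⟨fun h => (c7.mp ⟨h, hL⟩).2, fun h => (c7.mpr ⟨hL, h⟩).1⟩
      have d8 : PySem.Chars.endswith s.toList ['D', 'A', 'I'] = true ↔
          PySem.Str.slice s (some (-(3 : Int))) none = "DAI" :=
        ⟨fun h => (c8.mp ⟨h, hL⟩).2, fun h => (c8.mpr ⟨hL, h⟩).1⟩
      have d9 : PySem.Chars.endswith s.toList ['P', 'A', 'X'] = true ↔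
          PySem.Str.slice s (some (-(3 : Int))) none = "PAX" :=
        ⟨fun h => (c9.mp ⟨h, hL⟩).2, fun h => (c9.mpr ⟨hL, h⟩).1⟩
      have h3len := pv_len_cand3 s hL
      have g5 : PySem.Str.slice s (some (-(3 : Int))) none ≠ "USDT" := by
        intro h; rw [h] at h3len; simp at h3len
      have g6 : PySem.Str.slice s (some (-(3 : Int))) none ≠ "BUSD" := by
        intro h; rw [h] at h3len; simp at h3len
      have g7 : PySem.Str.slice s (some (-(3 : Int))) none ≠ "USDC" := by
        intro h; rw [h] at h3len; simp at h3len
      have g8 : PySem.Str.slice s (some (-(3 : Int))) none ≠ "TUSD" := by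
        intro h; rw [h] at h3len; simp at h3len
      by_cases f5 : PySem.Str.slice s (some (-(3 : Int))) none = "BTC"
      · simp [pvALoop, pvKnownQuotes, pvBLoop, d5, pvQuoteSet, PySem.Set.ofList, PySem.Set.add, hM, hL, f5]
      · by_cases f6 : PySem.Str.slice s (some (-(3 : Int))) none = "ETH"
        · simp [pvALoop, pvKnownQuotes, pvBLoop, d5, d6, pvQuoteSet, PySem.Set.ofList, PySem.Set.add, hM, hL, f5, f6]
        · by_cases f7 : PySem.Str.slice s (some (-(3 : Int))) none = "BNB"
          · simp [pvALoop, pvKnownQuotes, pvBLoop, d5, d6, d7, pvQuoteSet, PySem.Set.ofList, PySem.Set.add, hM, hL, f5, f6, f7]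
          · by_cases f8 : PySem.Str.slice s (some (-(3 : Int))) none = "DAI"
            · simp [pvALoop, pvKnownQuotes, pvBLoop, d5, d6, d7, d8, pvQuoteSet, PySem.Set.ofList, PySem.Set.add, hM, hL, f5, f6, f7, f8]
            · by_cases f9 : PySem.Str.slice s (some (-(3 : Int))) none = "PAX"
              · simp [pvALoop, pvKnownQuotes, pvBLoop, d5, d6, d7, d8, d9, pvQuoteSet, PySem.Set.ofList, PySem.Set.add, hM, hL,
                  f5, f6, f7, f8, f9]
              · simp [pvALoop, pvKnownQuotes, pvBLoop, d5, d6, d7, d8, d9, pvQuoteSet, PySem.Set.ofList, PySem.Set.add, hM, hL,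
                  f5, f6, f7, f8, f9, g5, g6, g7, g8]
    · simp [pvALoop, pvKnownQuotes, pvBLoop, pvQuoteSet, hM, hL]

-- ===== VERDICT (by name: the statement is the Claim_ definition above) =====
theorem symbol_to_base_quote_spec : Claim_equal_symbol_to_base_quote := by
  intro symbol _
  unfold Spec_symbol_to_base_quote symbol_to_base_quote symbol_to_base_quote_alt
  exact (pv_main (PySem.Str.upper symbol)).symm
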